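-- pv_equiv track=rewrite | github.com/ShirishDX007/python_dsa | Numbers/sum_num_list.py | list_nums
-- ===== SOURCE A (Python) =====
-- def list_nums(nums, sum_num):
--     result = []
--     for i in range(len(nums)):
--         for j in range(i+1, len(nums)):
--             if nums[i] + nums[j] == sum_num:
--                 c = (nums[i], nums[j])
--                 result.append(c)
--     return result
-- ===== SOURCE B (Python) =====
-- def list_nums(nums, sum_num):
--     pos = {}
--     for j, v in enumerate(nums):
--         pos.setdefault(v, []).append(j)
--     result = []
--     for i, v in enumerate(nums):
--         t = sum_num - v
--         for j in pos.get(t, ()):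
--             if j > i:
--                 result.append((v, t))
--     return result
-- ===== Notes on version B (the rewrite author's own statement) =====
-- stated objective: faster
-- what changed: Replaces the O(n^2) nested index scan by a one-pass dict indexing positions by value, then for each element scanning only the bucket of its complement sum_num - v, so the inner scan over all later indices disappears.
import Mathlib
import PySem

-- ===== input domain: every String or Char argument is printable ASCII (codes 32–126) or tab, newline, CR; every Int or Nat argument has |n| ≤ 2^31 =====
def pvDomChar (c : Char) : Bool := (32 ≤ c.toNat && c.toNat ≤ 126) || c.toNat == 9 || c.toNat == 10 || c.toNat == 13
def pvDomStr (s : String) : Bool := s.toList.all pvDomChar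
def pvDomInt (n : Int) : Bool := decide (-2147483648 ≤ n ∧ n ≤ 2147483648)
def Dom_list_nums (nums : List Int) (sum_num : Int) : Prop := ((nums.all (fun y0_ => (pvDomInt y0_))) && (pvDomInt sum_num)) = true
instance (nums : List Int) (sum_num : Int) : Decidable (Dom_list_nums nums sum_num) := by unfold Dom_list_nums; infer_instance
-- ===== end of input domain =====

-- B indexes positions by value in one pass, then scans only the complement's bucket per element (faster; A rescans the whole tail per element).

-- ===== PORT A =====
def list_nums (nums : List Int) (sum_num : Int) : List (Int × Int) :=
  (PySem.List.pyRange 0 nums.length 1).foldl (fun result i =>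
    (PySem.List.pyRange (i+1) nums.length 1).foldl (fun result j =>
      if PySem.List.pyGetD nums i 0 + PySem.List.pyGetD nums j 0 = sum_num then
        result ++ [(PySem.List.pyGetD nums i 0, PySem.List.pyGetD nums j 0)]
      else result) result) []

-- ===== PORT B =====
-- pos = {}; for j, v in enumerate(nums): pos.setdefault(v, []).append(j)
def pvBuildPos (nums : List Int) : PySem.Dict Int (List Int) :=
  (PySem.List.enumerate nums).foldl
    (fun pos jv => pos.insert jv.2 (pos.getD jv.2 [] ++ [jv.1])) PySem.Dict.empty

def list_nums_alt (nums : List Int) (sum_num : Int) : List (Int × Int) :=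
  let pos := pvBuildPos nums
  (PySem.List.enumerate nums).foldl (fun result iv =>
    ((pos.getD (sum_num - iv.2) []).foldl (fun result j =>
      if iv.1 < j then result ++ [(iv.2, sum_num - iv.2)] else result) result)) []

-- ===== PRECONDITION & SPEC =====
def Spec_list_nums (nums : List Int) (sum_num : Int) (out : List (Int × Int)) : Prop := out = list_nums_alt nums sum_num
instance (nums : List Int) (sum_num : Int) (out : List (Int × Int)) : Decidable (Spec_list_nums nums sum_num out) := by unfold Spec_list_nums; infer_instance

-- ===== CLAIM (what is proved, stated in full; the proofs are below) =====
def Claim_equal_list_nums : Prop := ∀ (nums : List Int) (sum_num : Int), Dom_list_nums nums sum_num → Spec_list_nums nums sum_num (list_nums nums sum_num)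

-- ===== LEMMAS AND PROOFS =====

-- the bucket of t after folding any pair list: old bucket ++ first components of pairs whose value is t
theorem pvBucket_foldl (t : Int) (l : List (Int × Int)) (d : PySem.Dict Int (List Int)) :
    ((l.foldl (fun pos jv => pos.insert jv.2 (pos.getD jv.2 [] ++ [jv.1])) d).getD t [])
      = d.getD t [] ++ ((l.filter (fun p => p.2 == t)).map (·.1)) := by
  induction l generalizing d with
  | nil => simp
  | cons p l ih =>
      simp only [List.foldl_cons, ih, List.filter_cons]
      by_cases h : p.2 = t
      · subst h
        simp [PySem.Dict.getD_insert_self]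
      · simp [PySem.Dict.getD_insert, h, Ne.symm h]

theorem pvBucket (nums : List Int) (t : Int) :
    (pvBuildPos nums).getD t []
      = (PySem.List.pyRange 0 nums.length 1).filter (fun j => PySem.List.pyGetD nums j 0 == t) := by
  rw [pvBuildPos, PySem.List.enumerate_eq_map_pyRange (d := 0), pvBucket_foldl]
  simp [List.filter_map, Function.comp_def, List.map_map]

-- 'if P: out.append(x)' over a decidable Prop test, as filter-then-map
theorem pvFoldlAppendIte {a b : Type} (p : a → Prop) [DecidablePred p] (f : a → b)
    (l : List a) (acc : List b) :
    l.foldl (fun acc x => if p x then acc ++ [f x] else acc) acc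
      = acc ++ (l.filter (fun x => decide (p x))).map f := by
  induction l generalizing acc with
  | nil => simp
  | cons x l ih => by_cases h : p x <;> simp [h, ih]

-- ===== VERDICT (by name: the statement is the Claim_ definition above) =====
theorem list_nums_spec : Claim_equal_list_nums := by
  intro nums sum_num _
  show _ = _
  rw [list_nums_alt, PySem.List.enumerate_eq_map_pyRange (d := 0), List.foldl_map, list_nums]
  apply PySem.List.foldl_congr_mem
  intro acc i hi
  dsimp only
  rw [PySem.List.mem_pyRange_one] at hi
  rw [pvBucket]
  rw [pvFoldlAppendIte (fun j => PySem.List.pyGetD nums i 0 + PySem.List.pyGetD nums j 0 = sum_num)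
        (fun j => (PySem.List.pyGetD nums i 0, PySem.List.pyGetD nums j 0)),
      pvFoldlAppendIte (fun j => i < j)
        (fun _ => (PySem.List.pyGetD nums i 0, sum_num - PySem.List.pyGetD nums i 0))]
  congr 1
  rw [List.filter_filter]
  rw [PySem.List.pyRange_one_append 0 (i+1) nums.length (by omega) (by omega),
      List.filter_append]
  have h1 : (PySem.List.pyRange 0 (i+1) 1).filter
      (fun j => decide (i < j) && (PySem.List.pyGetD nums j 0 == sum_num - PySem.List.pyGetD nums i 0)) = [] := by
    apply List.filter_eq_nil_iff.mpr
    intro j hj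
    rw [PySem.List.mem_pyRange_one] at hj
    simp only [Bool.and_eq_true, decide_eq_true_eq]
    omega
  rw [h1, List.nil_append]
  have h2 : ∀ j ∈ PySem.List.pyRange (i+1) nums.length 1,
      (decide (PySem.List.pyGetD nums i 0 + PySem.List.pyGetD nums j 0 = sum_num))
        = (decide (i < j) && (PySem.List.pyGetD nums j 0 == sum_num - PySem.List.pyGetD nums i 0)) := by
    intro j hj
    rw [PySem.List.mem_pyRange_one] at hj
    have hij : i < j := by omega
    simp only [hij, decide_true, Bool.true_and]
    rw [Bool.eq_iff_iff]
    simp only [decide_eq_true_eq, beq_iff_eq]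
    omega
  rw [List.filter_congr h2]
  apply List.map_congr_left
  intro j hj
  rw [List.mem_filter, Bool.and_eq_true] at hj
  have := hj.2.2
  simp only [beq_iff_eq] at this
  rw [this]
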